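-- pv_equiv track=rewrite | github.com/Akazfu/Python-Rewind | huawei/猴子爬山.py | monkeyclimb
-- ===== SOURCE A (Python) =====
-- def monkeyclimb(steps):
--     if steps == 1:
--         return 1
--     elif steps == 2:
--         return 1
--     elif steps == 3:
--         return 2
--     else:
--         return monkeyclimb(steps-1) + monkeyclimb(steps-3)
-- ===== SOURCE B (Python) =====
-- def monkeyclimb(steps):
--     # Bottom-up DP: keep the last three values f(k), f(k+1), f(k+2).
--     if steps == 1:
--         return 1
--     if steps == 2:
--         return 1
--     a, b, c = 1, 1, 2  # f(1), f(2), f(3)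
--     for _ in range(steps - 3):
--         a, b, c = b, c, c + a
--     return c
-- ===== Notes on version B (the rewrite author's own statement) =====
-- stated objective: faster
-- what changed: Replaced the exponential two-branch recursion with a bottom-up dynamic program keeping a sliding window of the last three values.
-- outside the precondition, e.g. on monkeyclimb(0): A raises RecursionError, B returns 2
import Mathlib
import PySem

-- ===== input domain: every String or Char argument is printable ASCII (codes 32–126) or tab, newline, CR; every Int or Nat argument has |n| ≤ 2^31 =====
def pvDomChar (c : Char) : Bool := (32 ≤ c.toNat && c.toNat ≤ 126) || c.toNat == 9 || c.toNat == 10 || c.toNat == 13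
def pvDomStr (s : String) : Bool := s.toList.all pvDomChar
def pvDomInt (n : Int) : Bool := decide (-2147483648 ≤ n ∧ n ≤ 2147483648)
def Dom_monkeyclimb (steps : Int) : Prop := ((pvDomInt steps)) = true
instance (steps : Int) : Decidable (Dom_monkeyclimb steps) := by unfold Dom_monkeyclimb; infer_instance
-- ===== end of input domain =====

-- B replaces A's exponential recursion by a bottom-up O(n) sliding-window DP (same values on steps ≥ 1).


-- ===== PORT A =====
-- Literal port of A's branch order; the `steps ≤ 0` guard only makes the Lean
-- function total where the Python recursion diverges (excluded by Pre_).
def monkeyclimb (steps : Int) : Int :=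
  if steps = 1 then 1
  else if steps = 2 then 1
  else if steps = 3 then 2
  else if steps ≤ 0 then 0
  else monkeyclimb (steps - 1) + monkeyclimb (steps - 3)
termination_by steps.toNat
decreasing_by all_goals omega

-- ===== PORT B =====
def monkeyclimb_alt (steps : Int) : Int :=
  if steps = 1 then 1
  else if steps = 2 then 1
  else
    (((List.range (steps - 3).toNat).foldl
        (fun (s : Int × Int × Int) _ => (s.2.1, s.2.2, s.2.2 + s.1)) (1, 1, 2))).2.2

-- ===== PRECONDITION & SPEC =====
-- Pre_ excludes steps ≤ 0, where the Python A never returns (unbounded recursion → RecursionError).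
def Pre_monkeyclimb (steps : Int) : Prop := 1 ≤ steps
instance (steps : Int) : Decidable (Pre_monkeyclimb steps) := by unfold Pre_monkeyclimb; infer_instance
def pvWitness_monkeyclimb : Int := 5
def Spec_monkeyclimb (steps : Int) (out : Int) : Prop := out = monkeyclimb_alt steps
instance (steps : Int) (out : Int) : Decidable (Spec_monkeyclimb steps out) := by unfold Spec_monkeyclimb; infer_instance

-- ===== CLAIM (what is proved, stated in full; the proofs are below) =====
def Claim_equal_monkeyclimb : Prop := ∀ (steps : Int), Dom_monkeyclimb steps → Pre_monkeyclimb steps → Spec_monkeyclimb steps (monkeyclimb steps)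

-- ===== LEMMAS AND PROOFS =====

-- The recurrence on Nat indices: auxA n = f(n+1).
def auxA : Nat → Int
  | 0 => 1
  | 1 => 1
  | 2 => 2
  | n + 3 => auxA (n + 2) + auxA n

theorem foldl_auxA (n : Nat) :
    (List.range n).foldl (fun (s : Int × Int × Int) _ => (s.2.1, s.2.2, s.2.2 + s.1)) (1, 1, 2)
      = (auxA n, auxA (n + 1), auxA (n + 2)) := by
  induction n with
  | zero => simp [auxA]
  | succ n ih => simp [List.range_succ, List.foldl_append, ih]; rfl

theorem monkeyclimb_eq_auxA : ∀ (k : Nat) (steps : Int), 1 ≤ steps → steps.toNat ≤ k →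
    monkeyclimb steps = auxA (steps - 1).toNat := by
  intro k
  induction k with
  | zero => intro steps h1 h2; omega
  | succ k ih =>
    intro steps h1 h2
    rw [monkeyclimb]
    split_ifs with h3 h4 h5 h6
    · subst h3; rfl
    · subst h4; rfl
    · subst h5; rfl
    · omega
    · have e1 : (steps - 1 - 1).toNat = (steps - 4).toNat + 2 := by omega
      have e2 : (steps - 3 - 1).toNat = (steps - 4).toNat := by omega
      have e3 : (steps - 1).toNat = (steps - 4).toNat + 3 := by omega
      rw [ih (steps - 1) (by omega) (by omega), ih (steps - 3) (by omega) (by omega),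
        e1, e2, e3, auxA]

-- ===== VERDICT (by name: the statement is the Claim_ definition above) =====
theorem monkeyclimb_spec : Claim_equal_monkeyclimb := by
  intro steps _ hpre
  have hpre' : 1 ≤ steps := hpre
  unfold Spec_monkeyclimb monkeyclimb_alt
  split_ifs with h1 h2
  · subst h1; rw [monkeyclimb]; norm_num
  · subst h2; rw [monkeyclimb]; norm_num
  · rw [foldl_auxA, monkeyclimb_eq_auxA steps.toNat steps hpre' (le_refl _)]
    have : (steps - 3).toNat + 2 = (steps - 1).toNat := by omega
    rw [this]
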